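-- pv_equiv track=rewrite | github.com/981377660LMT/algorithm-study | 9_排序和搜索/二分/经典题/卷积最大值.py | convolutionChmax1
-- ===== SOURCE A (Python) =====
-- from bisect import bisect_right
-- from itertools import accumulate
-- from typing import List
--
-- def convolutionChmax1(arr1: List[int], arr2: List[int], chMax: int) -> int:
--     sorted2 = sorted(arr2)
--     presum2 = list(accumulate(sorted2, initial=0))
--     res = 0
--     for v1 in arr1:
--         threshold = chMax - v1
--         pos = bisect_right(sorted2, threshold)
--         res += chMax * pos
--         if pos < len(sorted2):
--             remainingSum = presum2[-1] - presum2[pos]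
--             remainingCount = len(sorted2) - pos
--             res += remainingSum + v1 * remainingCount
--     return res
-- ===== SOURCE B (Python) =====
-- def convolutionChmax1(arr1, arr2, chMax):
--     s1 = sorted(arr1)
--     s2 = sorted(arr2)
--     n2 = len(s2)
--     pos = n2      # s2[pos:] are the values whose pair exceeds chMax for the current v1
--     suffix = 0    # sum(s2[pos:])
--     res = 0
--     for v1 in s1:
--         t = chMax - v1
--         while pos > 0 and s2[pos - 1] > t:
--             pos -= 1
--             suffix += s2[pos]
--         res += chMax * pos + suffix + v1 * (n2 - pos)
--     return res
-- ===== Notes on version B (the rewrite author's own statement) =====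
-- stated objective: faster
-- what changed: Replaces the per-element binary search into sorted2 plus a precomputed prefix-sum array by sorting arr1 too and sweeping it with one monotone pointer into sorted2 that carries a running suffix sum, so the split point and suffix total are updated incrementally instead of searched/looked up for each element.
import Mathlib
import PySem

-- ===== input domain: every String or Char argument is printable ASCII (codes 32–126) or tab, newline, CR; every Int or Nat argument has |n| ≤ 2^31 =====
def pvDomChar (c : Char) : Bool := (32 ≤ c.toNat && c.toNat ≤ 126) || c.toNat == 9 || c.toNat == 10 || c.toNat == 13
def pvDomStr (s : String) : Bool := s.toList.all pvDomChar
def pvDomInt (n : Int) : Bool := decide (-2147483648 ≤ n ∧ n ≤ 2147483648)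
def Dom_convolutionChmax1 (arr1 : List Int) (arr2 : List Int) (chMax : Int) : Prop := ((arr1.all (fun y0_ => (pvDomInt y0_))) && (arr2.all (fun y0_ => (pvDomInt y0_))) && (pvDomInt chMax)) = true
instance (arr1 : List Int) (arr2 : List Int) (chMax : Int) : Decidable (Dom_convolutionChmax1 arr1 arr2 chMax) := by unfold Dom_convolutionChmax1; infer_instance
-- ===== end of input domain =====

-- B replaces A's per-element binary search + prefix-sum array by sorting arr1 as well and
-- sweeping it with one monotone pointer into sorted arr2 that carries a running suffix sum
-- (alternative decomposition, same result).


-- ===== PORT A =====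
-- Literal port of A: sorted2 = sorted(arr2); presum2 = list(accumulate(sorted2, initial=0));
-- then for each v1 a bisect_right and two presum lookups.  presum2[-1] / presum2[pos] are
-- always in range in Python; ported with pyGetD (the default is never reached).
def convolutionChmax1 (arr1 : List Int) (arr2 : List Int) (chMax : Int) : Int :=
  let sorted2 := PySem.List.sorted arr2 (fun x => x) false
  let presum2 := List.scanl (· + ·) 0 sorted2
  arr1.foldl (fun res v1 =>
    let threshold := chMax - v1
    let pos := PySem.List.bisectRight sorted2 threshold
    let res := res + chMax * (pos : Int)
    if pos < sorted2.length then
      let remainingSum := PySem.List.pyGetD presum2 (-1) 0 - PySem.List.pyGetD presum2 (pos : Int) 0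
      let remainingCount := (sorted2.length : Int) - (pos : Int)
      res + remainingSum + v1 * remainingCount
    else res) 0

-- ===== PORT B =====
-- while pos > 0 and s2[pos - 1] > t: pos -= 1; suffix += s2[pos]
def pvAdvance (s2 : List Int) (t : Int) : Nat → Int → Nat × Int
  | 0, suffix => (0, suffix)
  | q + 1, suffix =>
      if t < PySem.List.pyGetD s2 (q : Int) 0 then
        pvAdvance s2 t q (suffix + PySem.List.pyGetD s2 (q : Int) 0)
      else (q + 1, suffix)

-- for v1 in s1: advance the pointer, add chMax*pos + suffix + v1*(n2 - pos)
def pvSweep (s2 : List Int) (chMax : Int) : List Int → Nat → Int → Int → Int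
  | [], _, _, res => res
  | v1 :: rest, pos, suffix, res =>
      let t := chMax - v1
      let ps := pvAdvance s2 t pos suffix
      pvSweep s2 chMax rest ps.1 ps.2
        (res + chMax * (ps.1 : Int) + ps.2 + v1 * ((s2.length : Int) - (ps.1 : Int)))

def convolutionChmax1_alt (arr1 : List Int) (arr2 : List Int) (chMax : Int) : Int :=
  let s1 := PySem.List.sorted arr1 (fun x => x) false
  let s2 := PySem.List.sorted arr2 (fun x => x) false
  pvSweep s2 chMax s1 s2.length 0 0

-- ===== PRECONDITION & SPEC =====
def Spec_convolutionChmax1 (arr1 : List Int) (arr2 : List Int) (chMax : Int) (out : Int) : Prop := out = convolutionChmax1_alt arr1 arr2 chMax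
instance (arr1 : List Int) (arr2 : List Int) (chMax : Int) (out : Int) : Decidable (Spec_convolutionChmax1 arr1 arr2 chMax out) := by unfold Spec_convolutionChmax1; infer_instance

-- ===== CLAIM (what is proved, stated in full; the proofs are below) =====
def Claim_equal_convolutionChmax1 : Prop := ∀ (arr1 : List Int) (arr2 : List Int) (chMax : Int), Dom_convolutionChmax1 arr1 arr2 chMax → Spec_convolutionChmax1 arr1 arr2 chMax (convolutionChmax1 arr1 arr2 chMax)

-- ===== LEMMAS AND PROOFS =====

-- the per-pair value both programs sum, written via the threshold test
def pvG (chMax v1 v : Int) : Int := if v ≤ chMax - v1 then chMax else v1 + v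

def pvInner (chMax : Int) (l : List Int) (v1 : Int) : Int := (l.map (pvG chMax v1)).sum

lemma sum_map_add_left (v1 : Int) (l : List Int) :
    (l.map (fun x => v1 + x)).sum = v1 * (l.length : Int) + l.sum := by
  induction l with
  | nil => simp
  | cons a l ih =>
    rw [List.map_cons, List.sum_cons, ih, List.length_cons, List.sum_cons]
    push_cast
    ring

lemma sum_map_const_int (c : Int) (l : List Int) :
    (l.map (fun _ => c)).sum = (l.length : Int) * c := by
  induction l with
  | nil => simp
  | cons a l ih =>
    rw [List.map_cons, List.sum_cons, ih, List.length_cons]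
    push_cast
    ring

-- split characterisation shared by both sides: if positions < p hold values ≤ chMax - v1 and
-- positions ≥ p hold larger values, the contribution formula equals pvInner
lemma pvSplit (s2 : List Int) (chMax v1 : Int) (p : Nat) (hp : p ≤ s2.length)
    (hlow : ∀ (j : Nat) (hj : j < s2.length), j < p → s2[j] ≤ chMax - v1)
    (hhigh : ∀ (j : Nat) (hj : j < s2.length), p ≤ j → chMax - v1 < s2[j]) :
    chMax * (p : Int) + (s2.drop p).sum + v1 * ((s2.length : Int) - (p : Int))
      = pvInner chMax s2 v1 := by
  have hlow' : ∀ x ∈ s2.take p, x ≤ chMax - v1 := by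
    intro x hx
    rw [List.mem_take_iff_getElem] at hx
    obtain ⟨i, hi, hxe⟩ := hx
    have hi1 : i < p := by omega
    have hi2 : i < s2.length := by omega
    have h := hlow i hi2 hi1
    rw [← hxe]
    simpa [List.getElem_take] using h
  have hhigh' : ∀ x ∈ s2.drop p, chMax - v1 < x := by
    intro x hx
    rw [List.mem_drop_iff_getElem] at hx
    obtain ⟨i, hi, hxe⟩ := hx
    have h := hhigh (p + i) (by omega) (by omega)
    rw [← hxe]
    simpa using h
  have hsplit : s2 = s2.take p ++ s2.drop p := (List.take_append_drop p s2).symm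
  have h1 : (s2.take p).map (pvG chMax v1) = (s2.take p).map (fun _ => chMax) := by
    apply List.map_congr_left
    intro x hx
    simp [pvG, hlow' x hx]
  have h2 : (s2.drop p).map (pvG chMax v1) = (s2.drop p).map (fun x => v1 + x) := by
    apply List.map_congr_left
    intro x hx
    simp [pvG, not_le.mpr (hhigh' x hx)]
  have hlen : ((s2.drop p).length : Int) = (s2.length : Int) - (p : Int) := by
    simp [List.length_drop]
    omega
  calc chMax * (p : Int) + (s2.drop p).sum + v1 * ((s2.length : Int) - (p : Int))
      = ((s2.take p).map (pvG chMax v1)).sum + ((s2.drop p).map (pvG chMax v1)).sum := by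
        rw [h1, h2, sum_map_add_left, hlen, sum_map_const_int]
        have : ((s2.take p).length : Int) = (p : Int) := by
          simp [List.length_take]
          omega
        rw [this]
        ring
    _ = pvInner chMax s2 v1 := by
        unfold pvInner
        conv_rhs => rw [hsplit]
        simp

-- scanl prefix sums: entry p is a + sum of the first p elements
lemma scanl_getElem? (l : List Int) (a : Int) (p : Nat) (hp : p ≤ l.length) :
    (List.scanl (· + ·) a l)[p]? = some (a + (l.take p).sum) := by
  induction l generalizing a p with
  | nil => simp at hp; simp [hp]
  | cons x l ih =>
    cases p with
    | zero => simp
    | succ q =>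
      simp only [List.scanl_cons, List.getElem?_cons_succ, List.take_succ_cons, List.sum_cons]
      rw [ih (a + x) q (by simpa using hp)]
      congr 1
      ring

lemma scanl_getLast (l : List Int) :
    (List.scanl (· + ·) (0 : Int) l).getLast? = some l.sum := by
  have h := scanl_getElem? l 0 l.length le_rfl
  rw [List.getLast?_eq_getElem?]
  simpa [List.length_scanl] using h

-- A's loop body adds exactly pvInner chMax (sorted arr2) v1
lemma contribA (arr2 : List Int) (chMax v1 res : Int) :
    (let sorted2 := PySem.List.sorted arr2 (fun x => x) false
     let presum2 := List.scanl (· + ·) 0 sorted2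
     let threshold := chMax - v1
     let pos := PySem.List.bisectRight sorted2 threshold
     let res := res + chMax * (pos : Int)
     if pos < sorted2.length then
       let remainingSum := PySem.List.pyGetD presum2 (-1) 0 - PySem.List.pyGetD presum2 (pos : Int) 0
       let remainingCount := (sorted2.length : Int) - (pos : Int)
       res + remainingSum + v1 * remainingCount
     else res)
    = res + pvInner chMax (PySem.List.sorted arr2 (fun x => x) false) v1 := by
  dsimp only
  set s2 := PySem.List.sorted arr2 (fun x => x) false with hs2
  have hsort : List.Pairwise (fun a b => a ≤ b) s2 := by
    simpa using PySem.List.sorted_pairwise arr2 (fun x => x)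
  obtain ⟨hple, hlow, hhigh⟩ := PySem.List.bisectRight_spec s2 (chMax - v1) hsort
  set p := PySem.List.bisectRight s2 (chMax - v1) with hpdef
  have hsplit := pvSplit s2 chMax v1 p hple (fun j hj hjp => hlow j hj hjp) hhigh
  have hlast : PySem.List.pyGetD (List.scanl (· + ·) (0:Int) s2) (-1) 0 = s2.sum := by
    have h1 : PySem.List.pyGet? (List.scanl (· + ·) (0:Int) s2) (-1)
        = some s2.sum := by rw [PySem.List.pyGet?_neg_one, scanl_getLast]
    simp [PySem.List.pyGetD, h1]
  have hpos : PySem.List.pyGetD (List.scanl (· + ·) (0:Int) s2) (p : Int) 0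
      = (s2.take p).sum := by
    rw [PySem.List.pyGetD_of_nonneg _ _ (Int.natCast_nonneg p)]
    have h := scanl_getElem? s2 0 p hple
    simp [List.getD_eq_getElem?_getD, Int.toNat_natCast, h]
  have hdrop : s2.sum - (s2.take p).sum = (s2.drop p).sum := by
    have h := congrArg List.sum (List.take_append_drop p s2)
    simp only [List.sum_append] at h
    omega
  by_cases hc : p < s2.length
  · rw [if_pos hc, hlast, hpos, ← hsplit]
    have : s2.sum - (s2.take p).sum = (s2.drop p).sum := hdrop
    rw [this]
    ring
  · have hpe : p = s2.length := le_antisymm hple (not_lt.mp hc)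
    rw [if_neg hc, ← hsplit, hpe]
    simp

lemma convolutionChmax1_eq_sum (arr1 arr2 : List Int) (chMax : Int) :
    convolutionChmax1 arr1 arr2 chMax
      = (arr1.map (pvInner chMax (PySem.List.sorted arr2 (fun x => x) false))).sum := by
  unfold convolutionChmax1
  have hbody : (fun (res v1 : Int) =>
      let sorted2 := PySem.List.sorted arr2 (fun x => x) false
      let presum2 := List.scanl (· + ·) 0 sorted2
      let threshold := chMax - v1
      let pos := PySem.List.bisectRight sorted2 threshold
      let res := res + chMax * (pos : Int)
      if pos < sorted2.length then
        let remainingSum := PySem.List.pyGetD presum2 (-1) 0 - PySem.List.pyGetD presum2 (pos : Int) 0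
        let remainingCount := (sorted2.length : Int) - (pos : Int)
        res + remainingSum + v1 * remainingCount
      else res)
      = (fun res v1 => res + pvInner chMax (PySem.List.sorted arr2 (fun x => x) false) v1) := by
    funext res v1
    exact contribA arr2 chMax v1 res
  simp only [hbody]
  rw [PySem.List.foldl_add]
  simp

-- the pointer invariant: pvAdvance lands exactly on the split point for threshold t,
-- with its suffix sum, provided everything at or past pos already exceeds t
lemma pvAdvance_spec (s2 : List Int) (hsort : List.Pairwise (fun a b => a ≤ b) s2) (t : Int) :
    ∀ (pos : Nat) (suffix : Int), pos ≤ s2.length →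
    suffix = (s2.drop pos).sum →
    (∀ (j : Nat) (hj : j < s2.length), pos ≤ j → t < s2[j]) →
    (pvAdvance s2 t pos suffix).1 ≤ pos ∧
    (pvAdvance s2 t pos suffix).2 = (s2.drop (pvAdvance s2 t pos suffix).1).sum ∧
    (∀ (j : Nat) (hj : j < s2.length), (pvAdvance s2 t pos suffix).1 ≤ j → t < s2[j]) ∧
    (∀ (j : Nat) (hj : j < s2.length), j < (pvAdvance s2 t pos suffix).1 → s2[j] ≤ t) := by
  intro pos
  induction pos with
  | zero =>
    intro suffix _ hsuf hhigh
    simp only [pvAdvance]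
    exact ⟨le_rfl, hsuf, hhigh, fun j hj hj0 => by omega⟩
  | succ q ih =>
    intro suffix hle hsuf hhigh
    have hq : q < s2.length := by omega
    have hget : PySem.List.pyGetD s2 (q : Int) 0 = s2[q] := by
      rw [PySem.List.pyGetD_eq_getElem s2 0 (Int.natCast_nonneg q) (by exact_mod_cast hq)]
      simp
    by_cases hc : t < PySem.List.pyGetD s2 (q : Int) 0
    · rw [show pvAdvance s2 t (q + 1) suffix
          = pvAdvance s2 t q (suffix + PySem.List.pyGetD s2 (q : Int) 0) by
        rw [pvAdvance, if_pos hc]]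
      have hdq : s2.drop q = s2[q] :: s2.drop (q + 1) :=
        List.drop_eq_getElem_cons hq
      have hsuf' : suffix + PySem.List.pyGetD s2 (q : Int) 0 = (s2.drop q).sum := by
        rw [hget, hsuf, hdq, List.sum_cons]
        ring
      have hhigh' : ∀ (j : Nat) (hj : j < s2.length), q ≤ j → t < s2[j] := by
        intro j hj hqj
        rcases Nat.eq_or_lt_of_le hqj with h | h
        · subst h; rw [hget] at hc; exact hc
        · exact hhigh j hj (by omega)
      obtain ⟨h1, h2, h3, h4⟩ := ih _ (by omega) hsuf' hhigh'
      exact ⟨h1.trans (by omega), h2, h3, h4⟩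
    · rw [show pvAdvance s2 t (q + 1) suffix = (q + 1, suffix) by rw [pvAdvance, if_neg hc]]
      refine ⟨le_rfl, hsuf, ?_, ?_⟩
      · intro j hj hle'; exact hhigh j hj hle'
      · intro j hj hjlt
        have hjq : j ≤ q := by omega
        have hqle : s2[q] ≤ t := by rw [hget] at hc; omega
        rcases Nat.eq_or_lt_of_le hjq with h | h
        · subst h; exact hqle
        · have := (List.pairwise_iff_getElem.mp hsort) j q (by omega) hq h
          omega

-- the sweep: starting from a valid pointer state, pvSweep adds the full pair-sum of s1
lemma pvSweep_spec (s2 : List Int) (chMax : Int)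
    (hsort : List.Pairwise (fun a b => a ≤ b) s2) :
    ∀ (s1 : List Int), List.Pairwise (fun a b => a ≤ b) s1 →
    ∀ (pos : Nat) (suffix res : Int), pos ≤ s2.length →
    suffix = (s2.drop pos).sum →
    (∀ v1 ∈ s1, ∀ (j : Nat) (hj : j < s2.length), pos ≤ j → chMax - v1 < s2[j]) →
    pvSweep s2 chMax s1 pos suffix res = res + (s1.map (pvInner chMax s2)).sum := by
  intro s1
  induction s1 with
  | nil => intro _ pos suffix res _ _ _; simp [pvSweep]
  | cons v1 rest ih =>
    intro hps1 pos suffix res hle hsuf hhigh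
    obtain ⟨hv1rest, hprest⟩ := List.pairwise_cons.mp hps1
    obtain ⟨h1, h2, h3, h4⟩ := pvAdvance_spec s2 hsort (chMax - v1) pos suffix hle hsuf
      (hhigh v1 (List.mem_cons_self) )
    set ps := pvAdvance s2 (chMax - v1) pos suffix with hps
    have hple : ps.1 ≤ s2.length := h1.trans hle
    have hcontrib := pvSplit s2 chMax v1 ps.1 hple h4 h3
    rw [show pvSweep s2 chMax (v1 :: rest) pos suffix res
        = pvSweep s2 chMax rest ps.1 ps.2
            (res + chMax * (ps.1 : Int) + ps.2 + v1 * ((s2.length : Int) - (ps.1 : Int)))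
      from rfl]
    rw [ih hprest ps.1 ps.2 _ hple h2
      (by
        intro u hu j hj hpj
        have huv : v1 ≤ u := hv1rest u hu
        have := h3 j hj hpj
        omega)]
    rw [List.map_cons, List.sum_cons, ← hcontrib]
    rw [h2]
    ring

-- ===== VERDICT (by name: the statement is the Claim_ definition above) =====
theorem convolutionChmax1_spec : Claim_equal_convolutionChmax1 := by
  intro arr1 arr2 chMax _
  unfold Spec_convolutionChmax1 convolutionChmax1_alt
  dsimp only
  set s1 := PySem.List.sorted arr1 (fun x => x) false with hs1
  set s2 := PySem.List.sorted arr2 (fun x => x) false with hs2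
  have hsort2 : List.Pairwise (fun a b => a ≤ b) s2 := by
    simpa using PySem.List.sorted_pairwise arr2 (fun x => x)
  have hsort1 : List.Pairwise (fun a b => a ≤ b) s1 := by
    simpa using PySem.List.sorted_pairwise arr1 (fun x => x)
  rw [pvSweep_spec s2 chMax hsort2 s1 hsort1 s2.length 0 0 le_rfl (by simp)
    (by intro v1 _ j hj hle; omega)]
  rw [convolutionChmax1_eq_sum, ← hs2]
  have hperm : s1.Perm arr1 := PySem.List.sorted_perm arr1 (fun x => x) false
  rw [((hperm.map (pvInner chMax s2)).sum_eq)]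
  ring
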